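-- pv_equiv track=rewrite | github.com/yourh/CLAlign | clalign/contrastive.py | get_matched_res
-- ===== SOURCE A (Python) =====
-- def get_matched_res(aln_text):
--     i, j, pos = 0, 0, []
--     for x in aln_text:
--         match x:
--             case ':': pos, i, j = pos + [(i, j)], i + 1, j + 1
--             case '1': i += 1
--             case '2': j += 1
--             case '.': i, j = i + 1, j + 1
--             case _: raise ValueError
--     return pos
-- ===== SOURCE B (Python) =====
-- def get_matched_res(aln_text):
--     o, t = 0, 0
--     ones, twos = [0], [0]
--     for c in aln_text:
--         if c not in ':12.':
--             raise ValueError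
--         o += c == '1'
--         t += c == '2'
--         ones.append(o)
--         twos.append(t)
--     return [(k - twos[k], k - ones[k]) for k, c in enumerate(aln_text) if c == ':']
-- ===== Notes on version B (the rewrite author's own statement) =====
-- stated objective: alternative
-- what changed: Replaces A's single accumulate-while-scanning loop carrying (i,j,pos) with a validate-and-precompute-then-filter shape: one pass builds prefix-count tables of the two gap characters, then a comprehension over enumerate selects the match positions and reads each index pair off the tables.
import Mathlib
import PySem

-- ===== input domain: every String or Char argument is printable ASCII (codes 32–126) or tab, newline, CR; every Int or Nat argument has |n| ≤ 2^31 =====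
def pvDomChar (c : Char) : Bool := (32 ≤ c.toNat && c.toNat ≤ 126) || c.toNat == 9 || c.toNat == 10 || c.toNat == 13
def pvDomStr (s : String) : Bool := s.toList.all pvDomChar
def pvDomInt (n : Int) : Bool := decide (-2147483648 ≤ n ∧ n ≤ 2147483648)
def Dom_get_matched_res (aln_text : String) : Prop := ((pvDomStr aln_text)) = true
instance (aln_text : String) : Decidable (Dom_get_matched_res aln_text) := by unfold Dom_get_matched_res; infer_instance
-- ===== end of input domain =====

-- B replaces A's single accumulate-while-scanning loop by prefix-count tables plus a
-- filtering comprehension (alternative decomposition, same asymptotic cost).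

-- ===== PORT A =====
-- one loop step of A; 'none' models the raised ValueError
def stepA (st : Option (Int × Int × List (Int × Int))) (x : Char) :
    Option (Int × Int × List (Int × Int)) :=
  match st with
  | none => none
  | some (i, j, pos) =>
    if x = ':' then some (i + 1, j + 1, pos ++ [(i, j)])
    else if x = '1' then some (i + 1, j, pos)
    else if x = '2' then some (i, j + 1, pos)
    else if x = '.' then some (i + 1, j + 1, pos)
    else none

def get_matched_res (aln_text : String) : List (Int × Int) :=
  match aln_text.toList.foldl stepA (some (0, 0, [])) with
  | some (_, _, pos) => pos
  | none => []

-- ===== PORT B =====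
-- one loop step of B: running counters o,t and the growing prefix tables; 'none' models the raise
def stepB (st : Option (Int × Int × List Int × List Int)) (c : Char) :
    Option (Int × Int × List Int × List Int) :=
  match st with
  | none => none
  | some (o, t, ones, twos) =>
    if c = ':' ∨ c = '1' ∨ c = '2' ∨ c = '.' then
      let o' := o + (if c = '1' then 1 else 0)
      let t' := t + (if c = '2' then 1 else 0)
      some (o', t', ones ++ [o'], twos ++ [t'])
    else none

def get_matched_res_alt (aln_text : String) : List (Int × Int) :=
  let cs := aln_text.toList
  match cs.foldl stepB (some (0, 0, [0], [0])) with
  | none => []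
  | some (_, _, ones, twos) =>
    (PySem.List.enumerate cs 0).filterMap (fun kc =>
      if kc.2 = ':' then
        some (kc.1 - PySem.List.pyGetD twos kc.1 0, kc.1 - PySem.List.pyGetD ones kc.1 0)
      else none)

-- ===== PRECONDITION & SPEC =====
-- Pre_ excludes exactly the strings containing a character other than the four alignment symbols, on which A raises ValueError.
def Pre_get_matched_res (aln_text : String) : Prop :=
  (aln_text.toList.all fun c => c == ':' || c == '1' || c == '2' || c == '.') = true
instance (aln_text : String) : Decidable (Pre_get_matched_res aln_text) := by
  unfold Pre_get_matched_res; infer_instance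
def pvWitness_get_matched_res : String := ":1.2:"

def Spec_get_matched_res (aln_text : String) (out : List (Int × Int)) : Prop := out = get_matched_res_alt aln_text
instance (aln_text : String) (out : List (Int × Int)) : Decidable (Spec_get_matched_res aln_text out) := by unfold Spec_get_matched_res; infer_instance

-- ===== CLAIM (what is proved, stated in full; the proofs are below) =====
def Claim_equal_get_matched_res : Prop := ∀ (aln_text : String), Dom_get_matched_res aln_text → Pre_get_matched_res aln_text → Spec_get_matched_res aln_text (get_matched_res aln_text)

-- ===== LEMMAS AND PROOFS =====

-- the intended result on a valid suffix, starting from residue indices i, j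
def mres : List Char → Int → Int → List (Int × Int)
  | [], _, _ => []
  | c :: cs, i, j =>
    if c = ':' then (i, j) :: mres cs (i + 1) (j + 1)
    else if c = '1' then mres cs (i + 1) j
    else if c = '2' then mres cs i (j + 1)
    else mres cs (i + 1) (j + 1)

def cnt (x : Char) (cs : List Char) : Int := (cs.count x : Int)

lemma cnt_nil (x : Char) : cnt x [] = 0 := by simp [cnt]

lemma cnt_cons (x c : Char) (cs : List Char) :
    cnt x (c :: cs) = cnt x cs + (if c = x then 1 else 0) := by
  rcases eq_or_ne c x with h | h <;> simp [cnt, h]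

lemma cnt_append_singleton (x c : Char) (cs : List Char) :
    cnt x (cs ++ [c]) = cnt x cs + (if c = x then 1 else 0) := by
  rcases eq_or_ne c x with h | h <;> simp [cnt, List.count_append, h]

lemma foldA_eq (cs : List Char) (i j : Int) (pos : List (Int × Int))
    (h : ∀ c ∈ cs, c = ':' ∨ c = '1' ∨ c = '2' ∨ c = '.') :
    cs.foldl stepA (some (i, j, pos)) =
      some (i + ((cs.length : Int) - cnt '2' cs), j + ((cs.length : Int) - cnt '1' cs),
            pos ++ mres cs i j) := by
  induction cs generalizing i j pos with
  | nil => simp [mres, cnt]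
  | cons c cs ih =>
    have hc := h c (by simp)
    have h' : ∀ c ∈ cs, c = ':' ∨ c = '1' ∨ c = '2' ∨ c = '.' := fun c hm => h c (by simp [hm])
    rcases hc with hc | hc | hc | hc <;>
      subst hc <;>
      simp [List.foldl_cons, stepA, mres, ih _ _ _ h', cnt_cons] <;>
      omega

lemma foldB_eq (cs : List Char) (o t : Int) (ones twos : List Int)
    (h : ∀ c ∈ cs, c = ':' ∨ c = '1' ∨ c = '2' ∨ c = '.') :
    cs.foldl stepB (some (o, t, ones, twos)) =
      some (o + cnt '1' cs, t + cnt '2' cs,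
            ones ++ (List.range cs.length).map (fun k => o + cnt '1' (cs.take (k + 1))),
            twos ++ (List.range cs.length).map (fun k => t + cnt '2' (cs.take (k + 1)))) := by
  induction cs generalizing o t ones twos with
  | nil => simp [cnt]
  | cons c cs ih =>
    have hc := h c (by simp)
    have h' : ∀ c ∈ cs, c = ':' ∨ c = '1' ∨ c = '2' ∨ c = '.' := fun c hm => h c (by simp [hm])
    rw [List.foldl_cons]
    have hstep : stepB (some (o, t, ones, twos)) c =
        some (o + (if c = '1' then 1 else 0), t + (if c = '2' then 1 else 0),
          ones ++ [o + (if c = '1' then 1 else 0)], twos ++ [t + (if c = '2' then 1 else 0)]) := by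
      simp [stepB, hc]
    rw [hstep, ih _ _ _ _ h']
    have hr : ∀ (f : ℕ → Int),
        (List.range (cs.length + 1)).map f = f 0 :: (List.range cs.length).map (fun k => f (k + 1)) := by
      intro f
      rw [List.range_succ_eq_map, List.map_cons, List.map_map]
      rfl
    refine congrArg some ?_
    refine Prod.ext ?_ (Prod.ext ?_ (Prod.ext ?_ ?_))
    · simp [cnt_cons]; ring
    · simp [cnt_cons]; ring
    · simp only [List.length_cons, hr, List.take_succ_cons, cnt_cons, List.take_zero, cnt_nil,
        List.append_assoc, List.singleton_append]
      congr 1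
      congr 1
      · ring
      · refine List.map_congr_left fun k _ => ?_
        ring
    · simp only [List.length_cons, hr, List.take_succ_cons, cnt_cons, List.take_zero, cnt_nil,
        List.append_assoc, List.singleton_append]
      congr 1
      congr 1
      · ring
      · refine List.map_congr_left fun k _ => ?_
        ring

-- lookup in the finished table: entry k is the count over the first k characters
lemma table_getD (x : Char) (cs : List Char) (k : Nat) (hk : k ≤ cs.length) :
    PySem.List.pyGetD
      (([0] : List Int) ++ (List.range cs.length).map (fun m => 0 + cnt x (cs.take (m + 1))))
      (k : Int) 0 = cnt x (cs.take k) := by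
  rw [PySem.List.pyGetD_natCast]
  cases k with
  | zero => simp [cnt]
  | succ m =>
    have hm : m < cs.length := by omega
    have : (([0] : List Int) ++ (List.range cs.length).map (fun m => 0 + cnt x (cs.take (m + 1)))).getD
        (m + 1) 0 = ((List.range cs.length).map (fun m => 0 + cnt x (cs.take (m + 1)))).getD m 0 := by
      simp
    rw [this]
    rw [List.getD_eq_getElem?_getD]
    simp [hm]

lemma filt_eq (full : List Char) (ones twos : List Int)
    (hones : ∀ (k : Nat), k ≤ full.length →
      PySem.List.pyGetD ones (k : Int) 0 = cnt '1' (full.take k))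
    (htwos : ∀ (k : Nat), k ≤ full.length →
      PySem.List.pyGetD twos (k : Int) 0 = cnt '2' (full.take k))
    (pre suf : List Char) (hfull : full = pre ++ suf)
    (hv : ∀ c ∈ suf, c = ':' ∨ c = '1' ∨ c = '2' ∨ c = '.') :
    (PySem.List.enumerate suf (pre.length : Int)).filterMap (fun kc =>
        if kc.2 = ':' then
          some (kc.1 - PySem.List.pyGetD twos kc.1 0, kc.1 - PySem.List.pyGetD ones kc.1 0)
        else none) =
      mres suf ((pre.length : Int) - cnt '2' pre) ((pre.length : Int) - cnt '1' pre) := by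
  induction suf generalizing pre with
  | nil => simp [PySem.List.enumerate, mres]
  | cons c suf ih =>
    have hc := hv c (by simp)
    have hv' : ∀ c ∈ suf, c = ':' ∨ c = '1' ∨ c = '2' ∨ c = '.' := fun c hm => hv c (by simp [hm])
    have hps : pre.length ≤ full.length := by simp [hfull]
    have hone : PySem.List.pyGetD ones (pre.length : Int) 0 = cnt '1' pre := by
      rw [hones pre.length hps]
      simp [hfull]
    have htwo : PySem.List.pyGetD twos (pre.length : Int) 0 = cnt '2' pre := by
      rw [htwos pre.length hps]
      simp [hfull]
    have hfull' : full = (pre ++ [c]) ++ suf := by simp [hfull]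
    have hlen : ((pre ++ [c]).length : Int) = (pre.length : Int) + 1 := by
      simp
    have ihx := ih (pre ++ [c]) hfull' hv'
    rw [hlen] at ihx
    rw [PySem.List.enumerate_cons, List.filterMap_cons]
    rcases hc with hc | hc | hc | hc <;> subst hc
    · simp only [cnt_append_singleton] at ihx
      simp [mres, hone, htwo, ihx]
      congr 1 <;> ring
    · simp only [cnt_append_singleton] at ihx
      simp [mres, ihx]
      congr 1
      all_goals ring
    · simp only [cnt_append_singleton] at ihx
      simp [mres, ihx]
      congr 1
      all_goals ring
    · simp only [cnt_append_singleton] at ihx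
      simp [mres, ihx]
      congr 1
      all_goals ring

-- ===== VERDICT (by name: the statement is the Claim_ definition above) =====
theorem get_matched_res_spec : Claim_equal_get_matched_res := by
  intro s _ hpre0
  have hpre : ∀ c ∈ s.toList, c = ':' ∨ c = '1' ∨ c = '2' ∨ c = '.' := by
    intro c hc
    have h := List.all_eq_true.mp hpre0 c hc
    simp at h
    tauto
  unfold Spec_get_matched_res
  simp only [get_matched_res, get_matched_res_alt]
  rw [foldA_eq _ _ _ _ hpre, foldB_eq _ _ _ _ _ hpre]
  simp only []
  have hf := filt_eq s.toList _ _
    (fun k hk => table_getD '1' s.toList k hk)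
    (fun k hk => table_getD '2' s.toList k hk)
    [] s.toList (by simp) hpre
  simp only [List.length_nil, Nat.cast_zero, cnt_nil, sub_zero] at hf
  simp at hf ⊢
  exact hf.symm
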